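-- pv_equiv track=rewrite | github.com/langcao/my_i3_dots | get_jukuu.py | get_ju
-- ===== SOURCE A (Python) =====
-- def get_ju(str):
-- 	line = str
-- 	for c in '.,?!:':
-- 		line = line.replace(c, c+' ')
-- 	ju = ''
-- 	first = False
-- 	for c in line:
-- 		if not c in [' ', '\t', '\n']:
-- 			ju += c
-- 			first = True
-- 		else:
-- 			if first:
-- 				ju += ' '
-- 				first = False
-- 	ju = ju.rstrip()
-- 	for c in '.,/?!':
-- 		ju = ju.replace(' '+c, c)
-- 		ju = ju.replace(c+' "', c+'"')
-- 		ju = ju.replace(c+" '", c+"'")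
-- 	tot = 1
-- 	for c in ju:
-- 		if c == ' ':
-- 			tot += 1
-- 	return ju, tot
-- ===== SOURCE B (Python) =====
-- def get_ju(str):
--     line = str
--     for c in '.,?!:':
--         line = line.replace(c, c + ' ')
--     normalized = ''.join(' ' if c in ' \t\n' else c for c in line)
--     ju = ' '.join(w for w in normalized.split(' ') if w).rstrip()
--     for c in '.,/?!':
--         ju = ju.replace(' ' + c, c)
--         ju = ju.replace(c + ' "', c + '"')
--         ju = ju.replace(c + " '", c + "'")
--     return ju, ju.count(' ') + 1
-- ===== Notes on version B (the rewrite author's own statement) =====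
-- stated objective: idiomatic
-- what changed: The char-by-char accumulator/flag whitespace-collapse loop is replaced by a normalize-map + split-on-space + filter + join pipeline, and the manual space-counting loop by the str.count method plus one.
import Mathlib
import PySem

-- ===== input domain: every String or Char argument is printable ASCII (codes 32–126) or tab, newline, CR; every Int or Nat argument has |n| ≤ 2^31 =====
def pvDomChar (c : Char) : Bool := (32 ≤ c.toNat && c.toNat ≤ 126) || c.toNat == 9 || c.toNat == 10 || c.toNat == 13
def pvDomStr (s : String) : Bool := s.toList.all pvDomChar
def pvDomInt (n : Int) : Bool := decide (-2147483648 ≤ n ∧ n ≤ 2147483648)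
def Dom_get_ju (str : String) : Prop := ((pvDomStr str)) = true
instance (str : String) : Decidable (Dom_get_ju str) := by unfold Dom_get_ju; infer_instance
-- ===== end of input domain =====

-- B replaces A's accumulator/flag whitespace-collapse loop by a normalize/split/filter/join
-- pipeline and the manual space-counting loop by count(' ')+1 (idiomatic; same return value).

-- ===== PORT A =====
def get_ju (str : String) : String × Int :=
  let line := ['.', ',', '?', '!', ':'].foldl
    (fun l c => PySem.Chars.replace l [c] [c, ' ']) str.toList
  let jf := line.foldl
    (fun (p : List Char × Bool) c =>
      if ¬ (c ∈ [' ', '\t', '\n']) then (p.1 ++ [c], true)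
      else if p.2 then (p.1 ++ [' '], false) else p)
    ([], false)
  let ju0 := PySem.Chars.rstrip jf.1
  let ju := ['.', ',', '/', '?', '!'].foldl
    (fun j c =>
      let j1 := PySem.Chars.replace j [' ', c] [c]
      let j2 := PySem.Chars.replace j1 [c, ' ', '"'] [c, '"']
      PySem.Chars.replace j2 [c, ' ', '\''] [c, '\''])
    ju0
  let tot := ju.foldl (fun t c => if c == ' ' then t + 1 else t) (1 : Int)
  (String.ofList ju, tot)

-- ===== PORT B =====
def get_ju_alt (str : String) : String × Int :=
  let line := ".,?!:".toList.foldl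
    (fun l c => PySem.Chars.replace l [c] [c, ' ']) str.toList
  let normalized := line.map (fun c => if c ∈ [' ', '\t', '\n'] then ' ' else c)
  let ju0 := PySem.Chars.rstrip (PySem.Chars.join [' ']
    ((PySem.Chars.splitOn normalized [' ']).filter (fun w => w ≠ [])))
  let ju := ".,/?!".toList.foldl
    (fun j c =>
      PySem.Chars.replace
        (PySem.Chars.replace (PySem.Chars.replace j [' ', c] [c]) [c, ' ', '"'] [c, '"'])
        [c, ' ', '\''] [c, '\''])
    ju0
  (String.ofList ju, (PySem.Chars.count ju [' '] : Int) + 1)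

-- ===== PRECONDITION & SPEC =====
def Spec_get_ju (str : String) (out : String × Int) : Prop := out = get_ju_alt str
instance (str : String) (out : String × Int) : Decidable (Spec_get_ju str out) := by unfold Spec_get_ju; infer_instance

-- ===== CLAIM (what is proved, stated in full; the proofs are below) =====
def Claim_equal_get_ju : Prop := ∀ (str : String), Dom_get_ju str → Spec_get_ju str (get_ju str)

-- ===== LEMMAS AND PROOFS =====

-- the collapsed text: colF = at a word boundary (nothing pending), colD = just after word content
mutual
def colF : List Char → List Char
  | [] => []
  | c :: t => if c ∈ [' ', '\t', '\n'] then colF t else c :: colD t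
def colD : List Char → List Char
  | [] => []
  | c :: t => if c ∈ [' ', '\t', '\n'] then (if colF t = [] then [] else ' ' :: colF t)
              else c :: colD t
end

-- simple recursion computing split-on-single-space
def sSplit : List Char → List Char → List (List Char)
  | [], cur => [cur.reverse]
  | c :: t, cur => if c = ' ' then cur.reverse :: sSplit t [] else sSplit t (c :: cur)

theorem splitOn_go_eq (fuel : Nat) :
    ∀ (l cur : List Char) (acc : List (List Char)), l.length ≤ fuel →
      PySem.Chars.splitOn.go [' '] fuel l cur acc = acc.reverse ++ sSplit l cur := by
  induction fuel with
  | zero =>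
    intro l cur acc h
    have : l = [] := List.eq_nil_of_length_eq_zero (Nat.le_zero.mp h)
    subst this
    simp [PySem.Chars.splitOn.go, sSplit]
  | succ n ih =>
    intro l cur acc h
    cases l with
    | nil => simp [PySem.Chars.splitOn.go, sSplit]
    | cons c t =>
      by_cases hc : c = ' '
      · subst hc
        simp only [PySem.Chars.splitOn.go, List.isPrefixOf, sSplit]
        simp only [List.length_cons, Nat.succ_le_succ_iff] at h
        rw [if_pos (by simp)]
        simp only [List.length_singleton, List.drop_one, List.tail_cons]
        rw [ih t [] (List.reverse cur :: acc) h]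
        simp
      · simp only [PySem.Chars.splitOn.go, List.isPrefixOf, sSplit]
        simp only [List.length_cons, Nat.succ_le_succ_iff] at h
        rw [if_neg (by simp [Ne.symm hc]), ih t (c :: cur) acc h]
        simp [hc]

theorem splitOn_eq (l : List Char) :
    PySem.Chars.splitOn l [' '] = sSplit l [] := by
  unfold PySem.Chars.splitOn
  rw [splitOn_go_eq (l.length + 1) l [] [] (Nat.le_succ _)]
  simp

def pvNorm (c : Char) : Char := if c ∈ [' ', '\t', '\n'] then ' ' else c

theorem join_ne_nil (x : List Char) (rs : List (List Char)) (hx : x ≠ []) :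
    PySem.Chars.join [' '] (x :: rs) ≠ [] := by
  cases rs with
  | nil => simpa [PySem.Chars.join_singleton] using hx
  | cons y ys =>
    rw [PySem.Chars.join_cons_cons]
    simp [hx]

theorem join_filter_sSplit (l : List Char) :
    (PySem.Chars.join [' ']
      ((sSplit (l.map pvNorm) []).filter (fun w => w ≠ [])) = colF l)
    ∧ ∀ cur : List Char, cur ≠ [] →
      PySem.Chars.join [' ']
        ((sSplit (l.map pvNorm) cur).filter (fun w => w ≠ [])) = cur.reverse ++ colD l := by
  induction l with
  | nil =>
    constructor
    · simp [sSplit, colF, PySem.Chars.join_nil]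
    · intro cur hcur
      simp [sSplit, List.filter, hcur, PySem.Chars.join_singleton, colD]
  | cons c t ih =>
    by_cases hc : c ∈ [' ', '\t', '\n']
    · have hn : pvNorm c = ' ' := by simp [pvNorm, hc]
      constructor
      · simp only [List.map_cons, hn, sSplit, if_pos rfl, List.reverse_nil, List.filter]
        simpa [colF, hc] using ih.1
      · intro cur hcur
        simp only [List.map_cons, hn, sSplit]
        rw [if_pos trivial, List.filter_cons_of_pos (by simp [hcur])]
        cases hrest : (sSplit (t.map pvNorm) []).filter (fun w => w ≠ []) with
        | nil =>
          have h1 : colF t = [] := by rw [← ih.1, hrest, PySem.Chars.join_nil]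
          simp [colD, hc, h1, PySem.Chars.join_singleton]
        | cons x rs =>
          have hx : x ≠ [] := by
            have := List.of_mem_filter (p := fun w => w ≠ []) (a := x)
              (by rw [hrest]; exact List.mem_cons_self ..)
            simpa using this
          have h1 : colF t ≠ [] := by
            rw [← ih.1, hrest]; exact join_ne_nil x rs hx
          rw [PySem.Chars.join_cons_cons, ← hrest, ih.1]
          simp [colD, hc, h1]
    · have hn : pvNorm c = c := by simp [pvNorm, hc]
      have hcs : ¬ c = ' ' := by intro h; exact hc (by simp [h])
      constructor
      · simp only [List.map_cons, hn, sSplit, if_neg hcs]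
        rw [(ih.2) [c] (by simp)]
        simp [colF, hc]
      · intro cur hcur
        simp only [List.map_cons, hn, sSplit, if_neg hcs]
        rw [(ih.2) (c :: cur) (by simp)]
        simp [colD, hc]

-- A's collapse loop, characterised: from flag=false it writes colF (possibly plus one
-- trailing space, only when something was written); from flag=true it writes colD likewise.
theorem machine_eq (l : List Char) :
    (∀ acc : List Char,
      ((l.foldl (fun (p : List Char × Bool) c =>
          if ¬ (c ∈ [' ', '\t', '\n']) then (p.1 ++ [c], true)
          else if p.2 then (p.1 ++ [' '], false) else p) (acc, false)).1 = acc ++ colF l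
        ∨ (colF l ≠ [] ∧ (l.foldl (fun (p : List Char × Bool) c =>
          if ¬ (c ∈ [' ', '\t', '\n']) then (p.1 ++ [c], true)
          else if p.2 then (p.1 ++ [' '], false) else p) (acc, false)).1 = acc ++ colF l ++ [' '])))
    ∧ (∀ acc : List Char,
      ((l.foldl (fun (p : List Char × Bool) c =>
          if ¬ (c ∈ [' ', '\t', '\n']) then (p.1 ++ [c], true)
          else if p.2 then (p.1 ++ [' '], false) else p) (acc, true)).1 = acc ++ colD l
        ∨ (l.foldl (fun (p : List Char × Bool) c =>
          if ¬ (c ∈ [' ', '\t', '\n']) then (p.1 ++ [c], true)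
          else if p.2 then (p.1 ++ [' '], false) else p) (acc, true)).1 = acc ++ colD l ++ [' '])) := by
  induction l with
  | nil => constructor <;> intro acc <;> simp [colF, colD]
  | cons c t ih =>
    constructor
    · intro acc
      by_cases hc : c ∈ [' ', '\t', '\n']
      · simp only [List.foldl_cons, if_neg (not_not_intro hc), if_neg (Bool.false_ne_true)]
        simpa [colF, hc] using ih.1 acc
      · simp only [List.foldl_cons, if_pos hc]
        rcases ih.2 (acc ++ [c]) with h | h
        · left; rw [h]; simp [colF, hc]
        · right
          refine ⟨by simp [colF, hc], ?_⟩
          rw [h]; simp [colF, hc]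
    · intro acc
      by_cases hc : c ∈ [' ', '\t', '\n']
      · simp only [List.foldl_cons, if_neg (not_not_intro hc), if_pos rfl, if_true]
        rcases ih.1 (acc ++ [' ']) with h | ⟨hne, h⟩
        · by_cases h0 : colF t = []
          · right; rw [h]; simp [colD, hc, h0]
          · left; rw [h]; simp [colD, hc, h0]
        · right; rw [h]; simp [colD, hc, hne]
      · simp only [List.foldl_cons, if_pos hc]
        rcases ih.2 (acc ++ [c]) with h | h
        · left; rw [h]; simp [colD, hc]
        · right; rw [h]; simp [colD, hc]

theorem rstrip_append_space (x : List Char) :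
    PySem.Chars.rstrip (x ++ [' ']) = PySem.Chars.rstrip x := by
  simp [PySem.Chars.rstrip, show PySem.Chars.isspace ' ' = true from rfl]

theorem count_go_eq (fuel : Nat) :
    ∀ (l : List Char) (acc : Nat), l.length ≤ fuel →
      PySem.Chars.count.go [' '] fuel l acc = acc + l.count ' ' := by
  induction fuel with
  | zero =>
    intro l acc h
    have : l = [] := List.eq_nil_of_length_eq_zero (Nat.le_zero.mp h)
    subst this
    simp [PySem.Chars.count.go]
  | succ n ih =>
    intro l acc h
    cases l with
    | nil => simp [PySem.Chars.count.go]
    | cons c t =>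
      simp only [List.length_cons, Nat.succ_le_succ_iff] at h
      by_cases hc : c = ' '
      · subst hc
        simp only [PySem.Chars.count.go, List.isPrefixOf]
        rw [if_pos (by simp), List.length_singleton, List.drop_one, List.tail_cons,
          ih t (acc + 1) h]
        simp
        omega
      · simp only [PySem.Chars.count.go, List.isPrefixOf]
        rw [if_neg (by simp [Ne.symm hc]), ih t acc h]
        simp [hc]

theorem count_space_eq (l : List Char) :
    PySem.Chars.count l [' '] = l.count ' ' := by
  unfold PySem.Chars.count
  rw [if_neg (by simp), count_go_eq l.length l 0 le_rfl]
  simp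

-- the two collapsed-and-rstripped strings agree
theorem pv_collapse_eq (l : List Char) :
    PySem.Chars.rstrip
      ((l.foldl (fun (p : List Char × Bool) c =>
          if ¬ (c ∈ [' ', '\t', '\n']) then (p.1 ++ [c], true)
          else if p.2 then (p.1 ++ [' '], false) else p) ([], false)).1)
    = PySem.Chars.rstrip (PySem.Chars.join [' ']
        ((PySem.Chars.splitOn (l.map (fun c => if c ∈ [' ', '\t', '\n'] then ' ' else c))
          [' ']).filter (fun w => w ≠ []))) := by
  have hmap : (l.map (fun c => if c ∈ [' ', '\t', '\n'] then ' ' else c)) = l.map pvNorm := by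
    simp [pvNorm]
  rw [hmap, splitOn_eq, (join_filter_sSplit l).1]
  rcases (machine_eq l).1 [] with h | ⟨_, h⟩
  · rw [h]; simp
  · rw [h]; simp [rstrip_append_space]

theorem get_ju_spec_aux : ∀ (str : String), get_ju str = get_ju_alt str := by
  intro s
  unfold get_ju get_ju_alt
  have hline : (".,?!:".toList : List Char) = ['.', ',', '?', '!', ':'] := rfl
  have hrep : (".,/?!".toList : List Char) = ['.', ',', '/', '?', '!'] := rfl
  rw [hline, hrep]
  simp only
  rw [pv_collapse_eq]
  generalize (['.', ',', '/', '?', '!'].foldl _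
    (PySem.Chars.rstrip (PySem.Chars.join [' '] _)) : List Char) = ju
  refine Prod.ext rfl ?_
  rw [PySem.List.foldl_beq_add_one, count_space_eq]
  omega

-- ===== VERDICT (by name: the statement is the Claim_ definition above) =====
theorem get_ju_spec : Claim_equal_get_ju := by
  intro s _
  unfold Spec_get_ju
  exact get_ju_spec_aux s
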